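-- pv_equiv track=rewrite | github.com/ishandutta2007/codeforces | bluediamond/normal/468/C.py | smart
-- ===== SOURCE A (Python) =====
-- def g(x):
--     return x * (x + 1) // 2
--
-- def smart(x):
--     #g(9) * 10 * (x / 100) + (if u2 cif > 0) g(u2 cif - 1) * 10 + (u2cif) * ((x % 10) + 1)
--
--     nr = x
--     sol = 0
--     p10 = 1
--     while nr > 0:
--         cif = nr % 10
--
--         sol += g(9) * p10 * (x // (p10 * 10))
--         if cif > 0:
--             sol += g(cif - 1) * p10
--             sol += cif * ((x % p10) + 1)
--         nr //= 10
--         p10 *= 10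
--     return sol
-- ===== SOURCE B (Python) =====
-- def digsum(n):
--     s = 0
--     while n > 0:
--         s += n % 10
--         n //= 10
--     return s
--
-- def smart(x):
--     # total of digit sums of 0..x, by a divide-and-conquer recurrence on x // 10
--     if x < 0:
--         return 0
--     if x < 10:
--         return x * (x + 1) // 2
--     q, r = divmod(x, 10)
--     return 10 * smart(q - 1) + 45 * q + (r + 1) * digsum(q) + r * (r + 1) // 2
-- ===== Notes on version B (the rewrite author's own statement) =====
-- stated objective: alternative
-- what changed: Replaced A's positional while-loop (one closed-form contribution per decimal digit position, accumulated with a running power of ten) by a divide-and-conquer recursion on the quotient by ten, grouping the numbers from zero up to x by that quotient and adding a digit-sum helper term per group.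
import Mathlib
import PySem

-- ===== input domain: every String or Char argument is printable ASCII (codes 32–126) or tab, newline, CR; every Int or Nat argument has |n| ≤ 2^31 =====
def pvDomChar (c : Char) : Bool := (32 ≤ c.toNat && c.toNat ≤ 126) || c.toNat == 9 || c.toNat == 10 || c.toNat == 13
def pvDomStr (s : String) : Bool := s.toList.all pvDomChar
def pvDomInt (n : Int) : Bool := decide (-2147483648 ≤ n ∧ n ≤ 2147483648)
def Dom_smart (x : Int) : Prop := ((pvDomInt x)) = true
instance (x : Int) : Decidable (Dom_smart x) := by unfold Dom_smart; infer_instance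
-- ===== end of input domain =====

-- B replaces A's per-digit-position closed-form loop by a divide-and-conquer recursion on x // 10
-- (grouping 0..x by quotient); alternative algorithm of the same cost, proved to return the same value.

-- ===== PORT A =====
def g (x : Int) : Int := PySem.Int.floordiv (x * (x + 1)) 2

def smartLoop (x nr sol p10 : Int) : Int :=
  if _h : nr > 0 then
    let cif := PySem.Int.mod nr 10
    let sol1 := sol + g 9 * p10 * PySem.Int.floordiv x (p10 * 10)
    let sol2 := if cif > 0 then sol1 + g (cif - 1) * p10 + cif * (PySem.Int.mod x p10 + 1) else sol1
    smartLoop x (PySem.Int.floordiv nr 10) sol2 (p10 * 10)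
  else sol
  termination_by nr.toNat
  decreasing_by
    rw [PySem.Int.floordiv_eq_ediv_of_pos (by norm_num : (0:Int) < 10)]
    omega

def smart (x : Int) : Int := smartLoop x x 0 1

-- ===== PORT B =====
def dsLoop (n s : Int) : Int :=
  if _h : n > 0 then dsLoop (PySem.Int.floordiv n 10) (s + PySem.Int.mod n 10) else s
  termination_by n.toNat
  decreasing_by
    rw [PySem.Int.floordiv_eq_ediv_of_pos (by norm_num : (0:Int) < 10)]
    omega

def digsum (n : Int) : Int := dsLoop n 0

def smart_alt (x : Int) : Int :=
  if _h0 : x < 0 then 0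
  else if _h : x < 10 then PySem.Int.floordiv (x * (x + 1)) 2
  else
    let q := PySem.Int.floordiv x 10
    let r := PySem.Int.mod x 10
    10 * smart_alt (q - 1) + 45 * q + (r + 1) * digsum q + PySem.Int.floordiv (r * (r + 1)) 2
  termination_by x.toNat
  decreasing_by
    rw [PySem.Int.floordiv_eq_ediv_of_pos (by norm_num : (0:Int) < 10)]
    omega

-- ===== PRECONDITION & SPEC =====
def Spec_smart (x : Int) (out : Int) : Prop := out = smart_alt x
instance (x : Int) (out : Int) : Decidable (Spec_smart x out) := by unfold Spec_smart; infer_instance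

-- ===== CLAIM (what is proved, stated in full; the proofs are below) =====
def Claim_equal_smart : Prop := ∀ (x : Int), Dom_smart x → Spec_smart x (smart x)

-- ===== LEMMAS AND PROOFS =====

theorem g_succ (r : Int) : g r = g (r - 1) + r := by
  unfold g
  rw [PySem.Int.floordiv_eq_ediv_of_pos (by norm_num : (0:Int) < 2),
      PySem.Int.floordiv_eq_ediv_of_pos (by norm_num : (0:Int) < 2)]
  have h2 : (r - 1) * (r - 1 + 1) = (r - 1) * r := by ring
  have h : r * (r + 1) = (r - 1) * r + r * 2 := by ring
  rw [h2, h, Int.add_mul_ediv_right _ _ (by norm_num : (2:Int) ≠ 0)]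


theorem dsLoop_nonpos (n s : Int) (h : ¬ n > 0) : dsLoop n s = s := by
  rw [dsLoop]; simp [h]

theorem dsLoop_acc_aux (k : Nat) : ∀ (n s : Int), n.toNat ≤ k → dsLoop n s = s + dsLoop n 0 := by
  induction k with
  | zero =>
    intro n s hn
    rw [dsLoop_nonpos n s (by omega), dsLoop_nonpos n 0 (by omega)]; ring
  | succ k ih =>
    intro n s hn
    by_cases h : n > 0
    · conv_lhs => rw [dsLoop]
      conv_rhs => rw [dsLoop]
      simp only [h, dif_pos]
      rw [PySem.Int.floordiv_eq_ediv_of_pos (by norm_num : (0:Int) < 10)]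
      conv_rhs => rw [ih (n / 10) _ (by omega)]
      conv_lhs => rw [ih (n / 10) _ (by omega)]
      ring
    · rw [dsLoop_nonpos n s h, dsLoop_nonpos n 0 h]; ring

theorem dsLoop_acc (n s : Int) : dsLoop n s = s + dsLoop n 0 :=
  dsLoop_acc_aux n.toNat n s le_rfl

theorem digsum_nonpos (n : Int) (h : n ≤ 0) : digsum n = 0 := by
  unfold digsum; rw [dsLoop_nonpos n 0 (by omega)]

theorem digsum_pos (n : Int) (h : 0 < n) : digsum n = digsum (n / 10) + n % 10 := by
  unfold digsum
  rw [dsLoop]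
  simp only [h, dif_pos]
  rw [PySem.Int.floordiv_eq_ediv_of_pos (by norm_num : (0:Int) < 10),
      PySem.Int.mod_eq_emod_of_pos (by norm_num : (0:Int) < 10)]
  rw [dsLoop_acc]; ring

theorem smartLoop_nonpos (x nr sol p : Int) (h : ¬ nr > 0) : smartLoop x nr sol p = sol := by
  rw [smartLoop]; simp [h]

theorem smartLoop_acc_aux (k : Nat) : ∀ (x nr sol p : Int), nr.toNat ≤ k →
    smartLoop x nr sol p = sol + smartLoop x nr 0 p := by
  induction k with
  | zero =>
    intro x nr sol p hn
    rw [smartLoop_nonpos x nr sol p (by omega), smartLoop_nonpos x nr 0 p (by omega)]; ring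
  | succ k ih =>
    intro x nr sol p hn
    by_cases h : nr > 0
    · conv_lhs => rw [smartLoop]
      conv_rhs => rw [smartLoop]
      simp only [h, dif_pos]
      rw [PySem.Int.floordiv_eq_ediv_of_pos (by norm_num : (0:Int) < 10)]
      conv_rhs => rw [ih x (nr / 10) _ _ (by omega)]
      conv_lhs => rw [ih x (nr / 10) _ _ (by omega)]
      by_cases hc : PySem.Int.mod nr 10 > 0 <;> simp only [hc, if_true, if_false] <;> ring
    · rw [smartLoop_nonpos x nr sol p h, smartLoop_nonpos x nr 0 p h]; ring

theorem smartLoop_acc (x nr sol p : Int) : smartLoop x nr sol p = sol + smartLoop x nr 0 p :=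
  smartLoop_acc_aux nr.toNat x nr sol p le_rfl

-- x % (10*p) = 10 * ((x/10) % p) + x % 10  for 0 ≤ x, 0 < p
theorem mod_split (x p : Int) (_hx : 0 ≤ x) (hp : 0 < p) :
    x % (p * 10) = 10 * ((x / 10) % p) + x % 10 := by
  have hm : 0 ≤ (x / 10) % p := Int.emod_nonneg _ (by omega)
  have hm2 : (x / 10) % p < p := Int.emod_lt_of_pos _ hp
  have hb : 0 ≤ x % 10 ∧ x % 10 < 10 := by omega
  have hx2 : x = (10 * ((x / 10) % p) + x % 10) + (p * 10) * ((x / 10) / p) := by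
    have e1 := Int.mul_ediv_add_emod (x / 10) p
    have e2 := Int.mul_ediv_add_emod x 10
    linarith
  calc x % (p * 10)
      = ((10 * ((x / 10) % p) + x % 10) + (p * 10) * ((x / 10) / p)) % (p * 10) := by rw [← hx2]
    _ = (10 * ((x / 10) % p) + x % 10) % (p * 10) :=
        Int.add_mul_emod_self_left (10 * ((x / 10) % p) + x % 10) (p * 10) ((x / 10) / p)
    _ = 10 * ((x / 10) % p) + x % 10 := Int.emod_eq_of_lt (by omega) (by nlinarith)

theorem step_aux (k : Nat) : ∀ (nr x p : Int), nr.toNat ≤ k → 0 ≤ x → 0 < p →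
    smartLoop x nr 0 (p * 10) =
      10 * smartLoop (x / 10) nr 0 p + (x % 10 - 9) * dsLoop nr 0 := by
  induction k with
  | zero =>
    intro nr x p hn hx hp
    rw [smartLoop_nonpos _ nr _ _ (by omega), smartLoop_nonpos _ nr _ _ (by omega),
        dsLoop_nonpos nr 0 (by omega)]
    ring
  | succ k ih =>
    intro nr x p hn hx hp
    by_cases h : nr > 0
    · conv_lhs => rw [smartLoop]
      conv_rhs => rw [smartLoop]
      conv_rhs => rw [dsLoop]
      simp only [h, dif_pos]
      rw [smartLoop_acc, smartLoop_acc (x / 10), dsLoop_acc]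
      rw [PySem.Int.floordiv_eq_ediv_of_pos (by norm_num : (0:Int) < 10)]
      have hPP : (0:Int) < p * 10 * 10 := by positivity
      have hP : (0:Int) < p * 10 := by positivity
      rw [PySem.Int.floordiv_eq_ediv_of_pos hPP, PySem.Int.floordiv_eq_ediv_of_pos hP,
          PySem.Int.mod_eq_emod_of_pos hP, PySem.Int.mod_eq_emod_of_pos (by norm_num : (0:Int) < 10),
          PySem.Int.mod_eq_emod_of_pos hp]
      have hE1 : x / (p * 10 * 10) = x / 10 / (p * 10) := by
        rw [Int.ediv_ediv_of_nonneg (by norm_num : (0:Int) ≤ 10)]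
        congr 1; ring
      have hE2 : x % (p * 10) = 10 * ((x / 10) % p) + x % 10 := mod_split x p hx hp
      have hIH : smartLoop x (nr / 10) 0 ((p * 10) * 10) =
          10 * smartLoop (x / 10) (nr / 10) 0 (p * 10) + (x % 10 - 9) * dsLoop (nr / 10) 0 := by
        exact ih (nr / 10) x (p * 10) (by omega) hx hP
      have hassoc : p * 10 * 10 = (p * 10) * 10 := by ring
      rw [hassoc, hIH]
      have hg9 : g 9 = 45 := by decide
      by_cases hc : nr % 10 > 0
      · simp only [hc, if_true]
        rw [hg9, hE1, hE2]; ring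
      · simp only [hc, if_false]
        have h0 : nr % 10 = 0 := by omega
        rw [hg9, hE1, h0]; ring
    · rw [smartLoop_nonpos _ nr _ _ h, smartLoop_nonpos _ nr _ _ h, dsLoop_nonpos nr 0 h]
      ring

-- A's recurrence: for 1 ≤ x
theorem R_A (x : Int) (hx : 1 ≤ x) :
    smart x = 10 * smart (x / 10) + 45 * (x / 10) + g (x % 10 - 1) + x % 10
      + (x % 10 - 9) * digsum (x / 10) := by
  unfold smart
  conv_lhs => rw [smartLoop]
  simp only [show x > 0 by omega, dif_pos]
  rw [smartLoop_acc]
  have h110 : (1:Int) * 10 = 10 := one_mul 10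
  rw [h110]
  have hm1 : PySem.Int.mod x 1 = 0 := by
    rw [PySem.Int.mod_eq_emod_of_pos one_pos]; omega
  rw [hm1]
  rw [PySem.Int.floordiv_eq_ediv_of_pos (by norm_num : (0:Int) < 10),
      PySem.Int.mod_eq_emod_of_pos (by norm_num : (0:Int) < 10)]
  have hstep := step_aux (x / 10).toNat (x / 10) x 1 le_rfl (by omega) one_pos
  rw [h110] at hstep
  rw [hstep]
  have hsm : smartLoop (x / 10) (x / 10) 0 1 = smart (x / 10) := rfl
  have hds : dsLoop (x / 10) 0 = digsum (x / 10) := rfl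
  have hg9 : g 9 = 45 := by decide
  rw [hsm, hds, hg9]
  by_cases hc : x % 10 > 0
  · simp only [hc, if_true]; ring
  · simp only [hc, if_false]
    have h0 : x % 10 = 0 := by omega
    rw [h0]
    have hgm1 : g (0 - 1) = 0 := by decide
    rw [hgm1]; ring

theorem alt_neg (x : Int) (h : x < 0) : smart_alt x = 0 := by
  rw [smart_alt]; simp [h]

theorem alt_small (x : Int) (h0 : 0 ≤ x) (h : x < 10) : smart_alt x = g x := by
  conv_lhs => rw [smart_alt]
  simp only [show ¬ x < 0 by omega, h, dif_pos]
  rfl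

theorem alt_unfold (x : Int) (h : 10 ≤ x) :
    smart_alt x = 10 * smart_alt (x / 10 - 1) + 45 * (x / 10)
      + (x % 10 + 1) * digsum (x / 10) + g (x % 10) := by
  conv_lhs => rw [smart_alt]
  simp only [show ¬ x < 0 by omega, show ¬ x < 10 by omega]
  rw [PySem.Int.floordiv_eq_ediv_of_pos (by norm_num : (0:Int) < 10),
      PySem.Int.mod_eq_emod_of_pos (by norm_num : (0:Int) < 10)]
  rfl

theorem ds_small (n : Int) (h0 : 0 < n) (h : n < 10) : digsum n = n := by
  rw [digsum_pos n h0, show n / 10 = 0 by omega, digsum_nonpos 0 le_rfl]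
  omega

theorem alt_succ_aux (k : Nat) : ∀ (q : Int), q.toNat ≤ k → 1 ≤ q →
    smart_alt q = smart_alt (q - 1) + digsum q := by
  induction k with
  | zero => intro q hk h1; omega
  | succ k ih =>
    intro q hk h1
    by_cases hq : q < 10
    · rw [alt_small q (by omega) hq, alt_small (q - 1) (by omega) (by omega),
          ds_small q (by omega) hq, g_succ q]
    · by_cases hb : 1 ≤ q % 10
      · rw [alt_unfold q (by omega), alt_unfold (q - 1) (by omega),
            show (q - 1) / 10 = q / 10 by omega, show (q - 1) % 10 = q % 10 - 1 by omega,
            digsum_pos q (by omega), g_succ (q % 10)]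
        ring
      · have hb0 : q % 10 = 0 := by omega
        by_cases ha : q / 10 < 2
        · have hq10 : q = 10 := by omega
          subst hq10
          have hds1 : digsum 1 = 1 := ds_small 1 one_pos (by norm_num)
          have hds10 : digsum 10 = 1 := by
            rw [digsum_pos 10 (by norm_num), show (10:Int) / 10 = 1 by norm_num,
                show (10:Int) % 10 = 0 by norm_num, hds1]
            norm_num
          rw [alt_unfold 10 (by norm_num), show (10:Int) / 10 = 1 by norm_num,
              show (10:Int) % 10 = 0 by norm_num, show (10:Int) - 1 = 9 by norm_num,
              show (1:Int) - 1 = 0 by norm_num, alt_small 9 (by norm_num) (by norm_num),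
              alt_small 0 le_rfl (by norm_num), hds1, hds10]
          decide
        · rw [alt_unfold q (by omega), alt_unfold (q - 1) (by omega),
              show (q - 1) / 10 = q / 10 - 1 by omega, show (q - 1) % 10 = 9 by omega, hb0,
              digsum_pos q (by omega), hb0,
              ih (q / 10 - 1) (by omega) (by omega)]
          have hgs : g 9 = 45 := by decide
          have hg0 : g 0 = 0 := by decide
          rw [hgs, hg0]
          ring

theorem eq_nonpos (x : Int) (h : x ≤ 0) : smart x = smart_alt x := by
  have hs : smart x = 0 := smartLoop_nonpos x x 0 1 (by omega)
  rw [hs]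
  by_cases hneg : x < 0
  · rw [alt_neg x hneg]
  · have hx0 : x = 0 := by omega
    subst hx0
    rw [alt_small 0 le_rfl (by norm_num)]
    decide

theorem smart_eq_alt_aux (k : Nat) : ∀ (x : Int), x.toNat ≤ k → smart x = smart_alt x := by
  induction k with
  | zero => intro x hk; exact eq_nonpos x (by omega)
  | succ k ih =>
    intro x hk
    by_cases hx : x ≤ 0
    · exact eq_nonpos x hx
    · by_cases hx10 : x < 10
      · rw [R_A x (by omega), show x / 10 = 0 by omega, digsum_nonpos 0 le_rfl,
            show smart 0 = 0 from smartLoop_nonpos 0 0 0 1 (by omega),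
            alt_small x (by omega) hx10, show x % 10 = x by omega, g_succ x]
        ring
      · rw [R_A x (by omega), ih (x / 10) (by omega),
            alt_succ_aux (x / 10).toNat (x / 10) le_rfl (by omega),
            alt_unfold x (by omega), g_succ (x % 10)]
        ring

-- ===== VERDICT (by name: the statement is the Claim_ definition above) =====
theorem smart_spec : Claim_equal_smart := by
  intro x _
  unfold Spec_smart
  exact smart_eq_alt_aux x.toNat x le_rfl
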